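-- pv_equiv track=rewrite | github.com/ItsADanny/HR.Basecamp | A2/W6/Problem 1/uniquecharacters.py | unique_chars_set
-- ===== SOURCE A (Python) =====
-- def unique_chars_set(word):
--     sets = set()
--
--     for char in word:
--         sets.add(char)
--
--     unique = 0
--     for set_value in sets:
--         unique += 1
--
--     return unique
-- ===== SOURCE B (Python) =====
-- def unique_chars_set(word):
--     chars = sorted(word)
--     unique = 0
--     prev = None
--     for c in chars:
--         if prev is None or c != prev:
--             unique += 1
--         prev = c
--     return unique
-- ===== Notes on version B (the rewrite author's own statement) =====
-- stated objective: alternative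
-- what changed: Replaces the hash-set build plus set-iteration count with sorting the characters and one adjacent-comparison scan that counts positions differing from their predecessor.
import Mathlib
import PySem

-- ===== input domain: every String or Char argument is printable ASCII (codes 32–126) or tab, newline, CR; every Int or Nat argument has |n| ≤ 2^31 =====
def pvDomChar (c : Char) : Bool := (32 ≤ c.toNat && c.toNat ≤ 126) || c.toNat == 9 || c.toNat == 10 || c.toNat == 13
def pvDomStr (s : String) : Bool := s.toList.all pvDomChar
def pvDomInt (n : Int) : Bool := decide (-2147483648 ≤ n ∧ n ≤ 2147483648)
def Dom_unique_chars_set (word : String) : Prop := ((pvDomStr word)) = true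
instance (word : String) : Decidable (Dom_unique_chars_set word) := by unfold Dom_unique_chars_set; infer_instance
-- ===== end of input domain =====

-- B replaces A's hash-set build + set-iteration count with sort-then-adjacent-comparison scan (alternative decomposition, same results).

-- ===== PORT A =====
def unique_chars_set (word : String) : Int :=
  let sets : PySem.Set Char := word.toList.foldl (fun s c => PySem.Set.add s c) PySem.Set.empty
  sets.foldl (fun (unique : Int) _ => unique + 1) 0

-- ===== PORT B =====
def unique_chars_set_alt (word : String) : Int :=
  let chars := PySem.List.sorted word.toList (fun c => c) false
  (chars.foldl
    (fun (st : Int × Option Char) c =>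
      (if st.2 = none ∨ st.2 ≠ some c then st.1 + 1 else st.1, some c))
    (0, none)).1

-- ===== PRECONDITION & SPEC =====
def Spec_unique_chars_set (word : String) (out : Int) : Prop := out = unique_chars_set_alt word
instance (word : String) (out : Int) : Decidable (Spec_unique_chars_set word out) := by unfold Spec_unique_chars_set; infer_instance

-- ===== CLAIM (what is proved, stated in full; the proofs are below) =====
def Claim_equal_unique_chars_set : Prop := ∀ (word : String), Dom_unique_chars_set word → Spec_unique_chars_set word (unique_chars_set word)

-- ===== LEMMAS AND PROOFS =====

-- counting fold = length
lemma pvCountFold (s : List Char) (a : Int) :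
    s.foldl (fun (u : Int) _ => u + 1) a = a + s.length := by
  induction s generalizing a with
  | nil => simp
  | cons c t ih => simp [List.foldl, ih]; omega

lemma pvInsertCard (c : Char) (s : Finset Char) :
    (insert c s).card = (s.erase c).card + 1 := by
  have h : insert c s = insert c (s.erase c) := by
    ext x; simp; tauto
  rw [h, Finset.card_insert_of_notMem (Finset.notMem_erase c s)]

-- B's scan with a previous character p that is ≤ every element of the sorted tail
lemma pvScanSome (s : List Char) (hs : s.Pairwise (· ≤ ·)) (p : Char)
    (hp : ∀ c ∈ s, p ≤ c) (a : Int) :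
    (s.foldl
      (fun (st : Int × Option Char) c =>
        (if st.2 = none ∨ st.2 ≠ some c then st.1 + 1 else st.1, some c))
      (a, some p)).1 = a + ((s.toFinset.erase p).card : Int) := by
  induction s generalizing p a with
  | nil => simp
  | cons c t ih =>
    have hs' := (List.pairwise_cons.mp hs).2
    have hc := (List.pairwise_cons.mp hs).1
    by_cases hcp : c = p
    · subst hcp
      simp only [List.foldl_cons]
      rw [show (if (some c : Option Char) = none ∨ (some c : Option Char) ≠ some c
            then a + 1 else a, some c) = ((a, some c) : Int × Option Char) by simp]
      rw [ih hs' c hc a]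
      congr 1
      rw [List.toFinset_cons, Finset.erase_insert_eq_erase]
    · have hpc : p ≤ c := hp c (List.mem_cons_self ..)
      have hplt : p < c := lt_of_le_of_ne hpc (fun h => hcp h.symm)
      simp only [List.foldl_cons]
      rw [show (if (some p : Option Char) = none ∨ (some p : Option Char) ≠ some c
            then a + 1 else a, some c) = ((a + 1, some c) : Int × Option Char) by
        simp; intro h; exact absurd h.symm hcp]
      rw [ih hs' c hc (a + 1)]
      have hpnot : p ∉ insert c t.toFinset := by
        simp only [Finset.mem_insert, List.mem_toFinset]
        rintro (h | h)
        · exact hcp h.symm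
        · exact absurd rfl (ne_of_lt (lt_of_lt_of_le hplt (hc p h))).symm
      rw [List.toFinset_cons, Finset.erase_eq_of_notMem hpnot, pvInsertCard]
      push_cast; ring

lemma pvScanMain (s : List Char) (hs : s.Pairwise (· ≤ ·)) :
    (s.foldl
      (fun (st : Int × Option Char) c =>
        (if st.2 = none ∨ st.2 ≠ some c then st.1 + 1 else st.1, some c))
      (0, none)).1 = (s.toFinset.card : Int) := by
  cases s with
  | nil => simp
  | cons c t =>
    have hs' := (List.pairwise_cons.mp hs).2
    have hc := (List.pairwise_cons.mp hs).1
    simp only [List.foldl_cons]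
    simp only [true_or, if_true]
    rw [pvScanSome t hs' c hc (0 + 1), List.toFinset_cons, pvInsertCard]
    push_cast; ring

-- A's set has the same members as the word's characters and no duplicates
lemma pvSetCard (l : List Char) :
    ((l.foldl (fun s c => PySem.Set.add s c) PySem.Set.empty : PySem.Set Char).length : Int)
      = (l.toFinset.card : Int) := by
  have h : (l.foldl (fun s c => PySem.Set.add s c) PySem.Set.empty : PySem.Set Char)
      = PySem.Set.ofList l := (PySem.Set.ofList_eq_foldl l).symm
  rw [h]
  have hnd : (PySem.Set.ofList l).Nodup := PySem.Set.nodup_ofList l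
  have hfs : (PySem.Set.ofList l).toFinset = l.toFinset := by
    ext x; simp [List.mem_toFinset, PySem.Set.mem_ofList]
  rw [← List.toFinset_card_of_nodup hnd, hfs]

-- ===== VERDICT (by name: the statement is the Claim_ definition above) =====
theorem unique_chars_set_spec : Claim_equal_unique_chars_set := by
  intro word _
  unfold Spec_unique_chars_set unique_chars_set unique_chars_set_alt
  simp only []
  rw [pvCountFold, pvScanMain _ (by
    simpa using PySem.List.sorted_pairwise word.toList (fun c => c))]
  have hperm := PySem.List.sorted_perm word.toList (fun c => c) false
  have hfe : (PySem.List.sorted word.toList (fun c => c) false).toFinset = word.toList.toFinset := by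
    ext x; simp [hperm.mem_iff]
  rw [hfe]
  rw [show ((0 : Int) + ((word.toList.foldl (fun s c => PySem.Set.add s c)
        PySem.Set.empty : PySem.Set Char).length : Int))
      = ((word.toList.foldl (fun s c => PySem.Set.add s c)
        PySem.Set.empty : PySem.Set Char).length : Int) by ring]
  exact pvSetCard word.toList
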